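-- pv_equiv track=rewrite | github.com/the-papi/advent-of-code | 2023/01.py | parse
-- ===== SOURCE A (Python) =====
-- STR_DIGIT_MAP = {
--     str_digit: str(i + 1)
--     for i, str_digit in enumerate(["one", "two", "three", "four", "five", "six", "seven", "eight", "nine"])
-- }
--
-- def parse(line):
--     output = []
--     while len(line) > 0:
--         for digit in (list(STR_DIGIT_MAP.keys()) + list(STR_DIGIT_MAP.values())):
--             if line.startswith(digit):
--                 output.append(digit)
--                 break
--
--         line = line[1:]
--
--     return output
-- ===== SOURCE B (Python) =====
-- BY_FIRST = {
--     "o": ["one"],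
--     "t": ["two", "three"],
--     "f": ["four", "five"],
--     "s": ["six", "seven"],
--     "e": ["eight"],
--     "n": ["nine"],
-- }
--
-- def parse(line):
--     out = []
--     for i, c in enumerate(line):
--         if c in "123456789":
--             out.append(c)
--         else:
--             for w in BY_FIRST.get(c, ()):
--                 if line.startswith(w, i):
--                     out.append(w)
--                     break
--     return out
-- ===== Notes on version B (the rewrite author's own statement) =====
-- stated objective: faster
-- what changed: B replaces A's while-loop that re-slices the string (an O(n) copy per step) and scans all 18 word/digit candidates at every position with a single index-based pass that tests the current character for being a nonzero decimal digit and otherwise looks up at most two word candidates in a first-letter bucket table, so the 18-candidate inner scan and the quadratic slicing disappear.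
import Mathlib
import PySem

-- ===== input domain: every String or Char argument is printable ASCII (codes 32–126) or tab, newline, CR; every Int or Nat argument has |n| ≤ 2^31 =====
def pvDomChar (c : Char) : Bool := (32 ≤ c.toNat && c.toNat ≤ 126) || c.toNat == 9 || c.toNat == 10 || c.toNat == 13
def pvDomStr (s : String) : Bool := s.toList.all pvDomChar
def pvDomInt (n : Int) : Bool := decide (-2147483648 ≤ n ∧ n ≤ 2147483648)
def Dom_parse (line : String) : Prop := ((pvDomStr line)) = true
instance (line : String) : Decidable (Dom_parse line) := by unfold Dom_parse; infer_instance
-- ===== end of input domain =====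

-- B replaces A's quadratic slice-and-scan-18-candidates loop with a single index pass using a
-- first-letter bucket table and a digit-character test (objective: faster).

-- ===== PORT A =====
-- A's candidate list: list(STR_DIGIT_MAP.keys()) + list(STR_DIGIT_MAP.values())
def digitsA : List (List Char) :=
  [['o','n','e'], ['t','w','o'], ['t','h','r','e','e'], ['f','o','u','r'], ['f','i','v','e'],
   ['s','i','x'], ['s','e','v','e','n'], ['e','i','g','h','t'], ['n','i','n','e'],
   ['1'], ['2'], ['3'], ['4'], ['5'], ['6'], ['7'], ['8'], ['9']]

-- the for-loop with break: the first candidate d with line.startswith(d) is appended (or nothing)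
def stepA (l : List Char) : List String :=
  match digitsA.find? (fun d => d.isPrefixOf l) with
  | some d => [String.ofList d]
  | none => []

-- while len(line) > 0: … ; line = line[1:]   (line[1:] on a nonempty list is its tail; exact)
def parseA : List Char → List String
  | [] => []
  | c :: rest => stepA (c :: rest) ++ parseA rest

def parse (line : String) : List String := parseA line.toList

-- ===== PORT B =====
-- BY_FIRST.get(c, ())
def byFirst (c : Char) : List (List Char) :=
  if c = 'o' then [['o','n','e']]
  else if c = 't' then [['t','w','o'], ['t','h','r','e','e']]
  else if c = 'f' then [['f','o','u','r'], ['f','i','v','e']]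
  else if c = 's' then [['s','i','x'], ['s','e','v','e','n']]
  else if c = 'e' then [['e','i','g','h','t']]
  else if c = 'n' then [['n','i','n','e']]
  else []

-- body of the loop at position i, where c :: rest = line[i:]; line.startswith(w, i) checks
-- that w is a prefix of line[i:] (exact)
def stepB (c : Char) (rest : List Char) : List String :=
  if c ∈ ['1','2','3','4','5','6','7','8','9'] then [String.ofList [c]]
  else
    match (byFirst c).find? (fun w => w.isPrefixOf (c :: rest)) with
    | some w => [String.ofList w]
    | none => []

def parseB : List Char → List String
  | [] => []
  | c :: rest => stepB c rest ++ parseB rest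

def parse_alt (line : String) : List String := parseB line.toList

-- ===== PRECONDITION & SPEC =====
def Spec_parse (line : String) (out : List String) : Prop := out = parse_alt line
instance (line : String) (out : List String) : Decidable (Spec_parse line out) := by unfold Spec_parse; infer_instance

-- ===== CLAIM (what is proved, stated in full; the proofs are below) =====
def Claim_equal_parse : Prop := ∀ (line : String), Dom_parse line → Spec_parse line (parse line)

-- ===== LEMMAS AND PROOFS =====

theorem step_eq (c : Char) (rest : List Char) : stepA (c :: rest) = stepB c rest := by
  by_cases ho : c = 'o'
  · subst ho
    cases hx : (['n','e'].isPrefixOf rest) <;>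
      simp [stepA, stepB, digitsA, byFirst, List.find?, List.isPrefixOf, hx]
  by_cases ht : c = 't'
  · subst ht
    cases hx : (['w','o'].isPrefixOf rest) <;> cases hy : (['h','r','e','e'].isPrefixOf rest) <;>
      simp [stepA, stepB, digitsA, byFirst, List.find?, List.isPrefixOf, hx, hy]
  by_cases hf : c = 'f'
  · subst hf
    cases hx : (['o','u','r'].isPrefixOf rest) <;> cases hy : (['i','v','e'].isPrefixOf rest) <;>
      simp [stepA, stepB, digitsA, byFirst, List.find?, List.isPrefixOf, hx, hy]
  by_cases hs : c = 's'
  · subst hs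
    cases hx : (['i','x'].isPrefixOf rest) <;> cases hy : (['e','v','e','n'].isPrefixOf rest) <;>
      simp [stepA, stepB, digitsA, byFirst, List.find?, List.isPrefixOf, hx, hy]
  by_cases he : c = 'e'
  · subst he
    cases hx : (['i','g','h','t'].isPrefixOf rest) <;>
      simp [stepA, stepB, digitsA, byFirst, List.find?, List.isPrefixOf, hx]
  by_cases hn : c = 'n'
  · subst hn
    cases hx : (['i','n','e'].isPrefixOf rest) <;>
      simp [stepA, stepB, digitsA, byFirst, List.find?, List.isPrefixOf, hx]
  by_cases h1 : c = '1'
  · subst h1; simp [stepA, stepB, digitsA, List.find?, List.isPrefixOf]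
  by_cases h2 : c = '2'
  · subst h2; simp [stepA, stepB, digitsA, List.find?, List.isPrefixOf]
  by_cases h3 : c = '3'
  · subst h3; simp [stepA, stepB, digitsA, List.find?, List.isPrefixOf]
  by_cases h4 : c = '4'
  · subst h4; simp [stepA, stepB, digitsA, List.find?, List.isPrefixOf]
  by_cases h5 : c = '5'
  · subst h5; simp [stepA, stepB, digitsA, List.find?, List.isPrefixOf]
  by_cases h6 : c = '6'
  · subst h6; simp [stepA, stepB, digitsA, List.find?, List.isPrefixOf]
  by_cases h7 : c = '7'
  · subst h7; simp [stepA, stepB, digitsA, List.find?, List.isPrefixOf]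
  by_cases h8 : c = '8'
  · subst h8; simp [stepA, stepB, digitsA, List.find?, List.isPrefixOf]
  by_cases h9 : c = '9'
  · subst h9; simp [stepA, stepB, digitsA, List.find?, List.isPrefixOf]
  have bo : ('o' == c) = false := beq_eq_false_iff_ne.mpr (Ne.symm ho)
  have bt : ('t' == c) = false := beq_eq_false_iff_ne.mpr (Ne.symm ht)
  have bf : ('f' == c) = false := beq_eq_false_iff_ne.mpr (Ne.symm hf)
  have bs : ('s' == c) = false := beq_eq_false_iff_ne.mpr (Ne.symm hs)
  have be : ('e' == c) = false := beq_eq_false_iff_ne.mpr (Ne.symm he)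
  have bn : ('n' == c) = false := beq_eq_false_iff_ne.mpr (Ne.symm hn)
  have b1 : ('1' == c) = false := beq_eq_false_iff_ne.mpr (Ne.symm h1)
  have b2 : ('2' == c) = false := beq_eq_false_iff_ne.mpr (Ne.symm h2)
  have b3 : ('3' == c) = false := beq_eq_false_iff_ne.mpr (Ne.symm h3)
  have b4 : ('4' == c) = false := beq_eq_false_iff_ne.mpr (Ne.symm h4)
  have b5 : ('5' == c) = false := beq_eq_false_iff_ne.mpr (Ne.symm h5)
  have b6 : ('6' == c) = false := beq_eq_false_iff_ne.mpr (Ne.symm h6)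
  have b7 : ('7' == c) = false := beq_eq_false_iff_ne.mpr (Ne.symm h7)
  have b8 : ('8' == c) = false := beq_eq_false_iff_ne.mpr (Ne.symm h8)
  have b9 : ('9' == c) = false := beq_eq_false_iff_ne.mpr (Ne.symm h9)
  simp [stepA, stepB, digitsA, byFirst, List.find?, List.isPrefixOf,
    bo, bt, bf, bs, be, bn, b1, b2, b3, b4, b5, b6, b7, b8, b9,
    ho, ht, hf, hs, he, hn, h1, h2, h3, h4, h5, h6, h7, h8, h9]

theorem parseAB (l : List Char) : parseA l = parseB l := by
  induction l with
  | nil => rfl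
  | cons c rest ih => simp [parseA, parseB, step_eq, ih]

-- ===== VERDICT (by name: the statement is the Claim_ definition above) =====
theorem parse_spec : Claim_equal_parse := by
  intro line _
  unfold Spec_parse parse parse_alt
  exact parseAB _
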